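-- pv_equiv track=rewrite | github.com/peopleatkorea-droid/project_K-ERA | src/kera_research/domain.py | order_culture_species
-- ===== SOURCE A (Python) =====
-- from typing import Iterable
--
-- CULTURE_SPECIES = {
--     "bacterial": [
--         "Staphylococcus aureus",
--         "Staphylococcus epidermidis",
--         "Staphylococcus hominis",
--         "Coagulase-negative Staphylococcus",
--         "Other Staphylococcus species",
--         "Streptococcus pneumoniae",
--         "Streptococcus viridans group",
--         "Other Streptococcus species",
--         "Enterococcus faecalis",
--         "Gemella species",
--         "Granulicatella species",
--         "Pseudomonas aeruginosa",
--         "Moraxella",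
--         "Corynebacterium",
--         "Rothia",
--         "Serratia marcescens",
--         "Bacillus",
--         "Other Gram-positive rods",
--         "Other Gram-negative rods",
--         "Haemophilus influenzae",
--         "Klebsiella pneumoniae",
--         "Enterobacter",
--         "Citrobacter",
--         "Burkholderia",
--         "Pandoraea species",
--         "Stenotrophomonas",
--         "Achromobacter",
--         "Nocardia",
--         "Other",
--     ],
--     "fungal": [
--         # Common molds first, then the remaining named molds, then yeasts, then catch-alls.
--         "Fusarium",
--         "Aspergillus",
--         "Acremonium",
--         "Alternaria",
--         "Australiasca species",
--         "Beauveria bassiana",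
--         "Bipolaris",
--         "Cladophialophora",
--         "Cladosporium",
--         "Colletotrichum",
--         "Curvularia",
--         "Exserohilum",
--         "Lasiodiplodia",
--         "Paecilomyces",
--         "Penicillium",
--         "Scedosporium",
--         "Other Molds",
--         "Candida",
--         "Other Yeasts",
--         "Other",
--     ],
-- }
--
-- def order_culture_species(category: str | None, species_names: Iterable[str]) -> list[str]:
--     normalized_category = str(category or "").strip().lower()
--     canonical_order = CULTURE_SPECIES.get(normalized_category, [])
--     canonical_rank = {species.casefold(): index for index, species in enumerate(canonical_order)}
--     deduped_species: list[str] = []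
--     seen: set[str] = set()
--
--     for raw_species in species_names:
--         species = str(raw_species or "").strip()
--         if not species:
--             continue
--         species_key = species.casefold()
--         if species_key in seen:
--             continue
--         seen.add(species_key)
--         deduped_species.append(species)
--
--     if not canonical_order:
--         return sorted(deduped_species, key=str.casefold)
--
--     return sorted(
--         deduped_species,
--         key=lambda species: (
--             0 if species.casefold() in canonical_rank else 1,
--             canonical_rank.get(species.casefold(), len(canonical_rank)),
--             species.casefold(),
--         ),
--     )
-- ===== SOURCE B (Python) =====
-- from typing import Iterable
--
-- CULTURE_SPECIES = {
--     "bacterial": [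
--         "Staphylococcus aureus",
--         "Staphylococcus epidermidis",
--         "Staphylococcus hominis",
--         "Coagulase-negative Staphylococcus",
--         "Other Staphylococcus species",
--         "Streptococcus pneumoniae",
--         "Streptococcus viridans group",
--         "Other Streptococcus species",
--         "Enterococcus faecalis",
--         "Gemella species",
--         "Granulicatella species",
--         "Pseudomonas aeruginosa",
--         "Moraxella",
--         "Corynebacterium",
--         "Rothia",
--         "Serratia marcescens",
--         "Bacillus",
--         "Other Gram-positive rods",
--         "Other Gram-negative rods",
--         "Haemophilus influenzae",
--         "Klebsiella pneumoniae",
--         "Enterobacter",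
--         "Citrobacter",
--         "Burkholderia",
--         "Pandoraea species",
--         "Stenotrophomonas",
--         "Achromobacter",
--         "Nocardia",
--         "Other",
--     ],
--     "fungal": [
--         "Fusarium",
--         "Aspergillus",
--         "Acremonium",
--         "Alternaria",
--         "Australiasca species",
--         "Beauveria bassiana",
--         "Bipolaris",
--         "Cladophialophora",
--         "Cladosporium",
--         "Colletotrichum",
--         "Curvularia",
--         "Exserohilum",
--         "Lasiodiplodia",
--         "Paecilomyces",
--         "Penicillium",
--         "Scedosporium",
--         "Other Molds",
--         "Candida",
--         "Other Yeasts",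
--         "Other",
--     ],
-- }
--
--
-- def order_culture_species(category: str | None, species_names: Iterable[str]) -> list[str]:
--     # Dedup once into a casefold->first-seen-original map, then emit the canonical
--     # catalogue entries in their fixed order followed by the rest sorted alphabetically
--     # (no sort key tuples, no rank dict, and the canonical block is never sorted at all).
--     normalized_category = str(category or "").strip().lower()
--     canonical_order = CULTURE_SPECIES.get(normalized_category, [])
--
--     firsts: dict[str, str] = {}
--     for raw_species in species_names:
--         species = str(raw_species or "").strip()
--         if species:
--             firsts.setdefault(species.casefold(), species)
--
--     result: list[str] = []
--     canonical_keys: set[str] = set()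
--     for canonical in canonical_order:
--         key = canonical.casefold()
--         canonical_keys.add(key)
--         if key in firsts:
--             result.append(firsts[key])
--
--     tail = [species for key, species in firsts.items() if key not in canonical_keys]
--     tail.sort(key=str.casefold)
--     return result + tail
-- ===== Notes on version B (the rewrite author's own statement) =====
-- stated objective: simpler
-- what changed: B drops A's casefold->rank dict and the stable sort of the whole deduped list under a (0/1, rank, casefold) key tuple; instead it dedups into a casefold->first-seen-original dict, walks the fixed canonical catalogue once emitting the stored originals in catalogue order, and alphabetically sorts only the non-canonical leftovers.
import Mathlib
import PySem

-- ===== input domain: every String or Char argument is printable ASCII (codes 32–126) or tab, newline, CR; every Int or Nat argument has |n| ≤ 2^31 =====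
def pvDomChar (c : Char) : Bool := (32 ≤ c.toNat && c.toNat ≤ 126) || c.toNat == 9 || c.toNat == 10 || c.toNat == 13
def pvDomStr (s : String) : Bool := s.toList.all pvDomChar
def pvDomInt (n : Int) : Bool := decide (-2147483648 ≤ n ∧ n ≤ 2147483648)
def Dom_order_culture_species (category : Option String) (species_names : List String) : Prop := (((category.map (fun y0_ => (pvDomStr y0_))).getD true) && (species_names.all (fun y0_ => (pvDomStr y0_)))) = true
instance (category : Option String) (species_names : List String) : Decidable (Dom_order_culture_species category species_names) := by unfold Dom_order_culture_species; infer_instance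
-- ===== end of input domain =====

-- B replaces A's rank-dict + triple-key sort of the whole list by a single pass over the
-- fixed canonical catalogue followed by an alphabetical sort of the non-canonical rest
-- (objective: simpler). str.casefold is ported as PySem.Str.lower — identical on the
-- ASCII domain Dom_order_culture_species admits.

-- shared module data: the CULTURE_SPECIES constant
def csBacterial : List String :=
  ["Staphylococcus aureus", "Staphylococcus epidermidis", "Staphylococcus hominis",
   "Coagulase-negative Staphylococcus", "Other Staphylococcus species",
   "Streptococcus pneumoniae", "Streptococcus viridans group", "Other Streptococcus species",
   "Enterococcus faecalis", "Gemella species", "Granulicatella species",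
   "Pseudomonas aeruginosa", "Moraxella", "Corynebacterium", "Rothia",
   "Serratia marcescens", "Bacillus", "Other Gram-positive rods", "Other Gram-negative rods",
   "Haemophilus influenzae", "Klebsiella pneumoniae", "Enterobacter", "Citrobacter",
   "Burkholderia", "Pandoraea species", "Stenotrophomonas", "Achromobacter", "Nocardia",
   "Other"]

def csFungal : List String :=
  ["Fusarium", "Aspergillus", "Acremonium", "Alternaria", "Australiasca species",
   "Beauveria bassiana", "Bipolaris", "Cladophialophora", "Cladosporium", "Colletotrichum",
   "Curvularia", "Exserohilum", "Lasiodiplodia", "Paecilomyces", "Penicillium",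
   "Scedosporium", "Other Molds", "Candida", "Other Yeasts", "Other"]

def csCultureSpecies : PySem.Dict String (List String) :=
  (PySem.Dict.empty.insert "bacterial" csBacterial).insert "fungal" csFungal

-- ===== PORT A =====
-- A's dict comprehension {species.casefold(): index for index, species in enumerate(canonical_order)}
def rankDict (canonical_order : List String) : PySem.Dict String Int :=
  (PySem.List.enumerate canonical_order 0).foldl
    (fun d p => d.insert (PySem.Str.lower p.2) p.1) PySem.Dict.empty

-- A's dedup loop body (state: deduped_species, seen)
def stepDedupA (st : List String × PySem.Set String) (raw_species : String) :
    List String × PySem.Set String :=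
  let species := PySem.Str.strip raw_species
  if species = "" then st
  else
    let species_key := PySem.Str.lower species
    if PySem.Set.contains st.2 species_key then st
    else (st.1 ++ [species], PySem.Set.add st.2 species_key)

-- A's triple sort key (0/1, rank, casefold) is compared as the equivalent ((0/1, rank), casefold)
-- two-level key via sorted2 (Lean forbids a bespoke lexicographic LT instance on triples here).
def order_culture_species (category : Option String) (species_names : List String) : List String :=
  let normalized_category := PySem.Str.lower (PySem.Str.strip (category.getD ""))
  let canonical_order := csCultureSpecies.getD normalized_category []
  let canonical_rank := rankDict canonical_order
  let deduped_species := (species_names.foldl stepDedupA ([], PySem.Set.empty)).1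
  if canonical_order = [] then
    PySem.List.sorted deduped_species (fun species => PySem.Str.lower species) false
  else
    PySem.List.sorted2 deduped_species
      (fun species => toLex
        (((if canonical_rank.contains (PySem.Str.lower species) then (0 : Int) else 1),
          canonical_rank.getD (PySem.Str.lower species) (canonical_rank.size : Int))))
      (fun species => PySem.Str.lower species) false

-- ===== PORT B =====
-- B's firsts loop body: casefold → first-seen stripped original
def stepFirstsB (d : PySem.Dict String String) (raw_species : String) : PySem.Dict String String :=
  let species := PySem.Str.strip raw_species
  if species = "" then d
  else d.setdefault (PySem.Str.lower species) species

-- B's canonical-pass loop body (state: result, canonical_keys)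
def stepCanonB (firsts : PySem.Dict String String) (st : List String × PySem.Set String)
    (canonical : String) : List String × PySem.Set String :=
  let key := PySem.Str.lower canonical
  let keys := PySem.Set.add st.2 key
  match firsts.get? key with
  | some species => (st.1 ++ [species], keys)
  | none => (st.1, keys)

def order_culture_species_alt (category : Option String) (species_names : List String) : List String :=
  let normalized_category := PySem.Str.lower (PySem.Str.strip (category.getD ""))
  let canonical_order := csCultureSpecies.getD normalized_category []
  let firsts := species_names.foldl stepFirstsB PySem.Dict.empty
  let st := canonical_order.foldl (stepCanonB firsts) ([], PySem.Set.empty)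
  let tail := (firsts.items.filter (fun p => !(PySem.Set.contains st.2 p.1))).map (fun p => p.2)
  st.1 ++ PySem.List.sorted tail (fun species => PySem.Str.lower species) false

-- ===== PRECONDITION & SPEC =====
def Spec_order_culture_species (category : Option String) (species_names : List String) (out : List String) : Prop := out = order_culture_species_alt category species_names
instance (category : Option String) (species_names : List String) (out : List String) : Decidable (Spec_order_culture_species category species_names out) := by unfold Spec_order_culture_species; infer_instance

-- ===== CLAIM (what is proved, stated in full; the proofs are below) =====
def Claim_equal_order_culture_species : Prop := ∀ (category : Option String) (species_names : List String), Dom_order_culture_species category species_names → Spec_order_culture_species category species_names (order_culture_species category species_names)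

-- ===== LEMMAS AND PROOFS =====

def dedAux : List String → List String → List String
  | [], acc => acc
  | r :: t, acc =>
    if PySem.Str.strip r = "" then dedAux t acc
    else if PySem.Str.lower (PySem.Str.strip r) ∈ acc.map PySem.Str.lower then dedAux t acc
    else dedAux t (acc ++ [PySem.Str.strip r])


theorem foldA (xs : List String) : ∀ (acc : List String),
    xs.foldl stepDedupA (acc, acc.map PySem.Str.lower)
      = (dedAux xs acc, (dedAux xs acc).map PySem.Str.lower) := by
  induction xs with
  | nil => intro acc; simp [dedAux]
  | cons r t ih =>
    intro acc
    simp only [List.foldl_cons, dedAux, stepDedupA]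
    by_cases h1 : PySem.Str.strip r = ""
    · simp [h1, ih acc]
    · simp only [h1, if_false]
      by_cases h2 : PySem.Str.lower (PySem.Str.strip r) ∈ acc.map PySem.Str.lower
      · have : PySem.Set.contains (acc.map PySem.Str.lower) (PySem.Str.lower (PySem.Str.strip r)) = true := by
          simp [PySem.Set.contains, h2]
        simp [h2, ih acc]
      · have hc : PySem.Set.contains (acc.map PySem.Str.lower) (PySem.Str.lower (PySem.Str.strip r)) = false := by
          simp [PySem.Set.contains, h2]
        have ha : PySem.Set.add (acc.map PySem.Str.lower) (PySem.Str.lower (PySem.Str.strip r))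
            = (acc ++ [PySem.Str.strip r]).map PySem.Str.lower := by
          simp [PySem.Set.add_of_not_mem h2]
        simp only [hc, if_neg h2, if_false, Bool.false_eq_true]
        rw [ha, ih (acc ++ [PySem.Str.strip r])]


theorem nodup_dedAux (xs : List String) : ∀ (acc : List String),
    (acc.map PySem.Str.lower).Nodup → ((dedAux xs acc).map PySem.Str.lower).Nodup := by
  induction xs with
  | nil => intro acc h; simpa [dedAux] using h
  | cons r t ih =>
    intro acc h
    simp only [dedAux]
    by_cases h1 : PySem.Str.strip r = ""
    · simp only [h1]; exact ih acc h
    · simp only [h1, if_false]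
      by_cases h2 : PySem.Str.lower (PySem.Str.strip r) ∈ acc.map PySem.Str.lower
      · simp only [if_pos h2]; exact ih acc h
      · simp only [if_neg h2]
        refine ih _ ?_
        rw [List.map_append]
        refine List.Nodup.append h (by simp) ?_
        intro a ha hb
        simp only [List.map_cons, List.map_nil, List.mem_cons, List.not_mem_nil, or_false] at hb
        subst hb
        exact h2 ha


theorem foldB (xs : List String) : ∀ (acc : List String) (d : PySem.Dict String String),
    d.items = acc.map (fun s => (PySem.Str.lower s, s)) →
    (xs.foldl stepFirstsB d).items = (dedAux xs acc).map (fun s => (PySem.Str.lower s, s)) := by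
  induction xs with
  | nil => intro acc d h; simpa [dedAux] using h
  | cons r t ih =>
    intro acc d h
    simp only [List.foldl_cons, dedAux, stepFirstsB]
    by_cases h1 : PySem.Str.strip r = ""
    · simp only [h1]; exact ih acc d h
    · simp only [h1, if_false]
      have hcont : d.contains (PySem.Str.lower (PySem.Str.strip r))
          = decide (PySem.Str.lower (PySem.Str.strip r) ∈ acc.map PySem.Str.lower) := by
        simp only [PySem.Dict.contains, h, List.any_map, Function.comp_def]
        rw [Bool.eq_iff_iff]
        simp [List.any_eq_true]
      by_cases h2 : PySem.Str.lower (PySem.Str.strip r) ∈ acc.map PySem.Str.lower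
      · rw [PySem.Dict.setdefault_of_contains d _ (by simp [hcont, h2])]
        simp only [if_pos h2]
        exact ih acc d h
      · have : d.setdefault (PySem.Str.lower (PySem.Str.strip r)) (PySem.Str.strip r)
            = PySem.Dict.mk (d.items ++ [(PySem.Str.lower (PySem.Str.strip r), PySem.Str.strip r)]) := by
          simp [PySem.Dict.setdefault, hcont, h2]
        rw [this]
        simp only [if_neg h2]
        exact ih (acc ++ [PySem.Str.strip r]) _ (by simp [h])


theorem foldCanon (F : PySem.Dict String String) (C : List String)
    (acc : List String) (ks : PySem.Set String) :
    C.foldl (stepCanonB F) (acc, ks)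
      = (acc ++ C.flatMap (fun c => (F.get? (PySem.Str.lower c)).toList),
         PySem.Set.update ks (C.map PySem.Str.lower)) := by
  have hstep : ∀ (st : List String × PySem.Set String) (c : String),
      stepCanonB F st c
        = (st.1 ++ (F.get? (PySem.Str.lower c)).toList, PySem.Set.add st.2 (PySem.Str.lower c)) := by
    intro st c
    simp only [stepCanonB]
    cases F.get? (PySem.Str.lower c) <;> simp
  have hfun : stepCanonB F = fun (st : List String × PySem.Set String) c =>
      ((fun a c => a ++ (F.get? (PySem.Str.lower c)).toList) st.1 c,
       (fun k c => PySem.Set.add k (PySem.Str.lower c)) st.2 c) := by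
    funext st c; exact hstep st c
  rw [hfun,
    PySem.List.foldl_prod_mk (f := fun a c => a ++ (F.get? (PySem.Str.lower c)).toList)
      (g := fun k c => PySem.Set.add k (PySem.Str.lower c)),
    PySem.List.foldl_append_eq_flatMap]
  congr 1
  simp only [PySem.Set.update, List.foldl_map]


theorem get_mkdict (ded : List String) (k : String) :
    (PySem.Dict.mk (ded.map (fun s => (PySem.Str.lower s, s)))).get? k
      = ded.find? (fun s => PySem.Str.lower s == k) := by
  simp only [PySem.Dict.get?, List.find?_map, Function.comp_def]
  cases ded.find? (fun s => PySem.Str.lower s == k) <;> simp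


theorem findEq (k : String) : ∀ (ded : List String), (ded.map PySem.Str.lower).Nodup →
    ded.filter (fun s => PySem.Str.lower s == k)
      = (ded.find? (fun s => PySem.Str.lower s == k)).toList := by
  intro ded
  induction ded with
  | nil => intro _; simp
  | cons s t ih =>
    intro h
    simp only [List.map_cons, List.nodup_cons] at h
    by_cases hs : PySem.Str.lower s = k
    · simp only [List.filter_cons, List.find?_cons, hs, beq_self_eq_true, if_pos, Option.toList_some]
      have : t.filter (fun x => PySem.Str.lower x == k) = [] := by
        rw [List.filter_eq_nil_iff]
        intro a ha hk
        rw [beq_iff_eq] at hk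
        exact h.1 (List.mem_map.mpr ⟨a, ha, hk.trans hs.symm⟩)
      simp [this]
    · have hbeq : (PySem.Str.lower s == k) = false := by simp [hs]
      simp only [List.filter_cons, List.find?_cons, hbeq]
      simpa using ih h.2


theorem perm_filter_or {α : Type} (p q : α → Bool) : ∀ (l : List α),
    (∀ x ∈ l, ¬(p x = true ∧ q x = true)) →
    (l.filter (fun x => p x || q x)).Perm (l.filter p ++ l.filter q) := by
  intro l
  induction l with
  | nil => intro _; simp
  | cons a t ih =>
    intro h
    have ht := ih (fun x hx => h x (List.mem_cons_of_mem a hx))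
    by_cases hp : p a = true
    · have hq : q a = false := by
        rcases Bool.eq_false_or_eq_true (q a) with h' | h'
        · exact absurd ⟨hp, h'⟩ (h a List.mem_cons_self)
        · exact h'
      simp only [List.filter_cons, hp, hq, Bool.true_or]
      simpa using ht.cons a
    · have hp' : p a = false := by simpa using hp
      by_cases hq : q a = true
      · simp only [List.filter_cons, hp', hq, Bool.false_or]
        refine ((ht.cons a).trans ?_)
        exact (List.perm_middle).symm
      · have hq' : q a = false := by simpa using hq
        simp only [List.filter_cons, hp', hq', Bool.false_or]
        simpa using ht


theorem sorted2_eq_sorted_toLex {α κ₁ κ₂ : Type} [LinearOrder κ₁] [LinearOrder κ₂]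
    (xs : List α) (k1 : α → κ₁) (k2 : α → κ₂) :
    PySem.List.sorted2 xs k1 k2 false
      = PySem.List.sorted xs (fun x => toLex (k1 x, k2 x)) false := by
  simp only [PySem.List.sorted2, PySem.List.sorted]
  congr 1
  funext acc x
  congr 1
  funext a b
  rw [Bool.eq_iff_iff]
  simp [Prod.Lex.lt_iff]
  constructor
  · rintro (h | ⟨h1, h2⟩)
    · exact Or.inl h
    · rcases lt_or_eq_of_le h1 with h' | h'
      · exact Or.inl h'
      · exact Or.inr ⟨h', h2⟩
  · rintro (h | ⟨h1, h2⟩)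
    · exact Or.inl h
    · exact Or.inr ⟨le_of_eq h1, h2⟩


theorem map_key_enumerate (C : List String) (s : Int) :
    (PySem.List.enumerate C s).map (fun p => PySem.Str.lower p.2) = C.map PySem.Str.lower := by
  have := PySem.List.map_snd_enumerate C s
  calc (PySem.List.enumerate C s).map (fun p => PySem.Str.lower p.2)
      = ((PySem.List.enumerate C s).map (fun p => p.2)).map PySem.Str.lower := by
        rw [List.map_map]; rfl
    _ = C.map PySem.Str.lower := by rw [this]


theorem rank_items (C : List String) (hC : (C.map PySem.Str.lower).Nodup) :
    (rankDict C).items = (PySem.List.enumerate C 0).map (fun p => (PySem.Str.lower p.2, p.1)) := by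
  have h := PySem.Dict.items_foldl_insert_fresh (PySem.List.enumerate C 0)
    (fun p => PySem.Str.lower p.2) (fun p => p.1) PySem.Dict.empty
    (by intro a _; rfl)
    (by rw [map_key_enumerate]; exact hC)
  simpa [rankDict, PySem.Dict.empty] using h


theorem find_enumerate (C : List String) (hC : (C.map PySem.Str.lower).Nodup) :
    ∀ (s : Int) (i : Nat) (hi : i < C.length),
    (PySem.List.enumerate C s).find? (fun p => PySem.Str.lower p.2 == PySem.Str.lower C[i])
      = some (s + i, C[i]) := by
  induction C with
  | nil => intro s i hi; simp at hi
  | cons c t ih =>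
    intro s i hi
    simp only [List.map_cons, List.nodup_cons] at hC
    rw [PySem.List.enumerate_cons]
    cases i with
    | zero => simp
    | succ j =>
      have hj : j < t.length := by simpa using hi
      have hne : (PySem.Str.lower c == PySem.Str.lower t[j]) = false := by
        simp only [beq_eq_false_iff_ne, ne_eq]
        intro he
        exact hC.1 (List.mem_map.mpr ⟨t[j], List.getElem_mem hj, he.symm⟩)
      rw [List.find?_cons]
      simp only [List.getElem_cons_succ, hne]
      rw [ih hC.2 (s+1) j hj]
      congr 2
      omega


theorem rank_get (C : List String) (hC : (C.map PySem.Str.lower).Nodup)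
    (i : Nat) (hi : i < C.length) :
    (rankDict C).get? (PySem.Str.lower C[i]) = some (i : Int) := by
  simp only [PySem.Dict.get?, rank_items C hC, List.find?_map, Function.comp_def]
  rw [find_enumerate C hC 0 i hi]
  simp


theorem rank_get_none (C : List String) (hC : (C.map PySem.Str.lower).Nodup)
    (k : String) (hk : k ∉ C.map PySem.Str.lower) :
    (rankDict C).get? k = none := by
  simp only [PySem.Dict.get?, rank_items C hC, List.find?_map, Function.comp_def]
  rw [List.find?_eq_none.mpr]
  · rfl
  · intro p hp
    simp only [beq_iff_eq]
    intro he
    exact hk (he ▸ List.mem_map.mpr ⟨p.2, by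
      have := PySem.List.map_snd_enumerate C (0:Int)
      exact ⟨by rw [← this]; exact List.mem_map.mpr ⟨p, hp, rfl⟩, rfl⟩⟩)


theorem rank_contains (C : List String) (hC : (C.map PySem.Str.lower).Nodup) (k : String) :
    (rankDict C).contains k = decide (k ∈ C.map PySem.Str.lower) := by
  simp only [PySem.Dict.contains, rank_items C hC, List.any_map, Function.comp_def]
  rw [Bool.eq_iff_iff]
  simp only [List.any_eq_true, decide_eq_true_eq, beq_iff_eq]
  constructor
  · rintro ⟨p, hp, he⟩
    refine he ▸ List.mem_map.mpr ⟨p.2, ?_, rfl⟩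
    have := PySem.List.map_snd_enumerate C (0:Int)
    rw [← this]; exact List.mem_map.mpr ⟨p, hp, rfl⟩
  · intro hm
    rcases List.mem_map.mp hm with ⟨x, hx, he⟩
    have : x ∈ (PySem.List.enumerate C 0).map (fun p => p.2) := by
      rw [PySem.List.map_snd_enumerate]; exact hx
    rcases List.mem_map.mp this with ⟨p, hp, he2⟩
    exact ⟨p, hp, by rw [he2]; exact he⟩


theorem rank_size (C : List String) (hC : (C.map PySem.Str.lower).Nodup) :
    (rankDict C).size = C.length := by
  simp [PySem.Dict.size, rank_items C hC, PySem.List.length_enumerate]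


theorem headPerm (ded : List String) (hd : (ded.map PySem.Str.lower).Nodup) :
    ∀ (C : List String), (C.map PySem.Str.lower).Nodup →
    (C.flatMap (fun c => (ded.find? (fun s => PySem.Str.lower s == PySem.Str.lower c)).toList)).Perm
      (ded.filter (fun s => decide (PySem.Str.lower s ∈ C.map PySem.Str.lower))) := by
  intro C
  induction C with
  | nil => intro _; simp
  | cons c t ih =>
    intro hC
    simp only [List.map_cons, List.nodup_cons] at hC
    rw [List.flatMap_cons, ← findEq _ ded hd]
    have hpred : (fun s => decide (PySem.Str.lower s ∈ (c :: t).map PySem.Str.lower))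
        = fun s => (PySem.Str.lower s == PySem.Str.lower c)
            || decide (PySem.Str.lower s ∈ t.map PySem.Str.lower) := by
      funext s
      simp only [List.map_cons, List.mem_cons]
      rw [Bool.eq_iff_iff]
      simp only [decide_eq_true_eq, Bool.or_eq_true, beq_iff_eq]
    rw [hpred]
    refine List.Perm.symm ?_
    refine ((perm_filter_or _ _ ded ?_).trans ?_)
    · intro x _ ⟨h1, h2⟩
      simp only [beq_iff_eq] at h1
      rw [decide_eq_true_eq] at h2
      exact hC.1 (h1 ▸ h2)
    · exact List.Perm.append_left _ (ih hC.2).symm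


set_option maxRecDepth 4096 in
theorem nodup_bacterial : (csBacterial.map PySem.Str.lower).Nodup := by decide


set_option maxRecDepth 4096 in
theorem nodup_fungal : (csFungal.map PySem.Str.lower).Nodup := by decide


theorem culture_items : csCultureSpecies.items = [("bacterial", csBacterial), ("fungal", csFungal)] := by
  rfl


theorem culture_lookup (k : String) :
    csCultureSpecies.getD k [] = [] ∨ ((csCultureSpecies.getD k []).map PySem.Str.lower).Nodup := by
  by_cases hb : k = "bacterial"
  · right
    subst hb
    have : csCultureSpecies.get? "bacterial" = some csBacterial := by
      unfold csCultureSpecies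
      rw [PySem.Dict.get?_insert_of_ne (PySem.Dict.empty.insert "bacterial" csBacterial)
        (k := "fungal") (k' := "bacterial") csFungal (by decide), PySem.Dict.get?_insert_self]
    simp [PySem.Dict.getD, this, nodup_bacterial]
  · by_cases hf : k = "fungal"
    · right
      subst hf
      have : csCultureSpecies.get? "fungal" = some csFungal := PySem.Dict.get?_insert_self _ _ _
      simp [PySem.Dict.getD, this, nodup_fungal]
    · left
      have h2 : csCultureSpecies.get? k = none := by
        simp only [PySem.Dict.get?, culture_items]
        rw [List.find?_eq_none.mpr]
        · rfl
        · intro p hp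
          simp only [List.mem_cons, List.not_mem_nil, or_false] at hp
          rcases hp with h | h <;> subst h
          · simpa using fun h' => hb h'.symm
          · simpa using fun h' => hf h'.symm
      simp [PySem.Dict.getD, h2]


def keyA (C : List String) (s : String) : Lex (Lex (Int × Int) × String) :=
  toLex (toLex
    (((if (rankDict C).contains (PySem.Str.lower s) then (0 : Int) else 1),
      (rankDict C).getD (PySem.Str.lower s) ((rankDict C).size : Int))), PySem.Str.lower s)


theorem keyA_of_mem (C : List String) (hC : (C.map PySem.Str.lower).Nodup)
    (x : String) (i : Nat) (hi : i < C.length) (hx : PySem.Str.lower x = PySem.Str.lower C[i]) :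
    keyA C x = toLex (toLex ((0 : Int), (i : Int)), PySem.Str.lower x) := by
  have hmem : PySem.Str.lower x ∈ C.map PySem.Str.lower := by
    rw [hx]; exact List.mem_map.mpr ⟨C[i], List.getElem_mem hi, rfl⟩
  have hcont : (rankDict C).contains (PySem.Str.lower x) = true := by
    rw [rank_contains C hC]; simpa using hmem
  have hget : (rankDict C).getD (PySem.Str.lower x) ((rankDict C).size : Int) = (i : Int) := by
    simp [PySem.Dict.getD, hx, rank_get C hC i hi]
  simp [keyA, hcont, hget]


theorem keyA_of_not_mem (C : List String) (hC : (C.map PySem.Str.lower).Nodup)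
    (x : String) (hx : PySem.Str.lower x ∉ C.map PySem.Str.lower) :
    keyA C x = toLex (toLex ((1 : Int), (C.length : Int)), PySem.Str.lower x) := by
  have hcont : (rankDict C).contains (PySem.Str.lower x) = false := by
    rw [rank_contains C hC]; simpa using hx
  have hget : (rankDict C).getD (PySem.Str.lower x) ((rankDict C).size : Int)
      = ((rankDict C).size : Int) := by
    simp [PySem.Dict.getD, rank_get_none C hC _ hx]
  simp [keyA, hcont, PySem.Dict.getD, rank_get_none C hC _ hx, rank_size C hC]


theorem nonempty_case (C ded : List String)
    (hC : (C.map PySem.Str.lower).Nodup) (hd : (ded.map PySem.Str.lower).Nodup)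
    (F : PySem.Dict String String)
    (hF : F.items = ded.map (fun s => (PySem.Str.lower s, s))) :
    PySem.List.sorted2 ded
      (fun species => toLex
        (((if (rankDict C).contains (PySem.Str.lower species) then (0 : Int) else 1),
          (rankDict C).getD (PySem.Str.lower species) (((rankDict C).size : Int)))))
      (fun species => PySem.Str.lower species) false
    = (C.foldl (stepCanonB F) ([], PySem.Set.empty)).1
      ++ PySem.List.sorted
          ((F.items.filter (fun p =>
              !(PySem.Set.contains (C.foldl (stepCanonB F) ([], PySem.Set.empty)).2 p.1))).map
            (fun p => p.2))
          (fun species => PySem.Str.lower species) false := by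
  have hFeq : F = PySem.Dict.mk (ded.map (fun s => (PySem.Str.lower s, s))) := PySem.Dict.ext hF
  subst hFeq
  rw [sorted2_eq_sorted_toLex, foldCanon]
  simp only [List.nil_append]
  -- name the pieces
  set lo := PySem.Str.lower with hlo
  have hks : ∀ x, PySem.Set.contains (PySem.Set.update PySem.Set.empty (C.map lo)) x
      = decide (x ∈ C.map lo) := by
    intro x
    rw [Bool.eq_iff_iff]
    simp only [PySem.Set.contains, List.contains_iff_mem, decide_eq_true_eq]
    rw [PySem.Set.mem_update]
    simp [PySem.Set.empty]
  -- tail as a filter of ded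
  have htail : ((ded.map (fun s => (lo s, s))).filter (fun p =>
        !(PySem.Set.contains (PySem.Set.update PySem.Set.empty (C.map lo)) p.1))).map
        (fun p => p.2)
      = ded.filter (fun s => !decide (lo s ∈ C.map lo)) := by
    rw [List.filter_map, List.map_map]
    have : ((fun p : String × String => !(PySem.Set.contains (PySem.Set.update PySem.Set.empty (C.map lo)) p.1))
        ∘ (fun s => (lo s, s))) = fun s => !decide (lo s ∈ C.map lo) := by
      funext s; simp only [Function.comp_apply, hks]
    rw [this]
    have : ((fun p : String × String => p.2) ∘ (fun s => (lo s, s))) = id := by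
      funext s; rfl
    rw [this, List.map_id]
  rw [htail]
  -- the head as a flatMap of find?s
  have hget : ∀ c, (PySem.Dict.mk (ded.map (fun s => (lo s, s)))).get? (lo c)
      = ded.find? (fun s => lo s == lo c) := fun c => get_mkdict ded (lo c)
  simp only [hget]
  -- identify the sort key with keyA
  have hkey : (fun x => toLex
        (toLex ((if (rankDict C).contains (lo x) = true then (0 : Int) else 1),
          (rankDict C).getD (lo x) (((rankDict C).size : Int))), lo x))
      = keyA C := rfl
  rw [hkey]
  -- the target list
  set p : String → Bool := fun s => decide (lo s ∈ C.map lo) with hp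
  set tail : List String := ded.filter (fun s => !decide (lo s ∈ C.map lo)) with htl
  set flat : List String :=
    C.flatMap (fun c => (ded.find? (fun s => lo s == lo c)).toList) with hfl
  refine PySem.List.sorted_eq_of_perm_of_pairwise_lt ded
    (flat ++ PySem.List.sorted tail (fun s => lo s) false) (keyA C) ?_ ?_
  · -- permutation
    refine ((headPerm ded hd C hC).append (PySem.List.sorted_perm tail (fun s => lo s) false)).trans ?_
    exact List.filter_append_perm _ ded
  · -- strictly increasing keys
    have hmemflat : ∀ x ∈ flat, lo x ∈ C.map lo ∧ x ∈ ded := by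
      intro x hx
      rcases List.mem_flatMap.mp hx with ⟨c, hc, hxc⟩
      have hsome := Option.mem_toList.mp hxc
      have hpx := List.find?_some hsome
      simp only [beq_iff_eq] at hpx
      exact ⟨hpx ▸ List.mem_map.mpr ⟨c, hc, rfl⟩, List.mem_of_find?_eq_some hsome⟩
    have hmemtail : ∀ x ∈ PySem.List.sorted tail (fun s => lo s) false, lo x ∉ C.map lo := by
      intro x hx
      rw [PySem.List.mem_sorted] at hx
      rcases List.mem_filter.mp hx with ⟨_, hpx⟩
      simpa using hpx
    rw [List.pairwise_append]
    refine ⟨?_, ?_, ?_⟩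
    · -- within the canonical block
      rw [hfl, List.flatMap_def, List.pairwise_flatten]
      constructor
      · intro l hl
        rcases List.mem_map.mp hl with ⟨c, _, hlc⟩
        subst hlc
        cases ded.find? (fun s => lo s == lo c) <;> simp
      · rw [List.pairwise_map]
        rw [List.pairwise_iff_getElem]
        intro i j hi hj hij x hx y hy
        have hxs := List.find?_some (Option.mem_toList.mp hx)
        have hys := List.find?_some (Option.mem_toList.mp hy)
        simp only [beq_iff_eq] at hxs hys
        rw [keyA_of_mem C hC x i hi hxs, keyA_of_mem C hC y j hj hys]
        rw [Prod.Lex.lt_iff]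
        left
        rw [Prod.Lex.lt_iff]
        right
        refine ⟨rfl, ?_⟩
        show (i : Int) < (j : Int)
        exact_mod_cast hij
    · -- within the alphabetical tail
      have hle := PySem.List.sorted_pairwise tail (fun s => lo s)
      have hnd : ((PySem.List.sorted tail (fun s => lo s) false).map lo).Nodup := by
        have h1 : (tail.map lo).Nodup :=
          List.Nodup.sublist (List.Sublist.map lo List.filter_sublist) hd
        exact (((PySem.List.sorted_perm tail (fun s => lo s) false).map lo).symm).nodup h1
      have hne := List.pairwise_map.mp hnd
      refine ((hle.and hne).imp_of_mem ?_)
      intro a b ha hb hab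
      rw [keyA_of_not_mem C hC a (hmemtail a ha), keyA_of_not_mem C hC b (hmemtail b hb)]
      rw [Prod.Lex.lt_iff]
      right
      exact ⟨rfl, lt_of_le_of_ne hab.1 hab.2⟩
    · -- canonical block before the tail
      intro a ha b hb
      rcases List.mem_map.mp (hmemflat a ha).1 with ⟨c, hc, hlc⟩
      rcases List.getElem_of_mem hc with ⟨i, hi, hci⟩
      rw [keyA_of_mem C hC a i hi (by rw [hci]; exact hlc.symm),
        keyA_of_not_mem C hC b (hmemtail b hb)]
      rw [Prod.Lex.lt_iff]
      left
      rw [Prod.Lex.lt_iff]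
      left
      exact Int.zero_lt_one


-- ===== VERDICT (by name: the statement is the Claim_ definition above) =====
theorem order_culture_species_spec : Claim_equal_order_culture_species := by
  intro category species_names _
  simp only [Spec_order_culture_species, order_culture_species, order_culture_species_alt]
  have hded : species_names.foldl stepDedupA ([], PySem.Set.empty)
      = (dedAux species_names [], (dedAux species_names []).map PySem.Str.lower) :=
    foldA species_names []
  have hfirsts : species_names.foldl stepFirstsB PySem.Dict.empty
      = PySem.Dict.mk ((dedAux species_names []).map (fun s => (PySem.Str.lower s, s))) :=
    PySem.Dict.ext (foldB species_names [] PySem.Dict.empty rfl)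
  have hnd : ((dedAux species_names []).map PySem.Str.lower).Nodup :=
    nodup_dedAux species_names [] (by simp)
  rw [hded, hfirsts]
  simp only []
  by_cases hC0 : csCultureSpecies.getD (PySem.Str.lower (PySem.Str.strip (category.getD ""))) [] = []
  · rw [hC0]
    simp only [List.foldl_nil]
    have hcont : ∀ (x : String), PySem.Set.contains PySem.Set.empty x = false := fun x => rfl
    simp only [hcont, Bool.not_false, List.filter_true, List.map_map]
    have : ((fun p : String × String => p.2) ∘ fun s => (PySem.Str.lower s, s))
        = fun s => s := rfl
    rw [this, List.map_id']
    simp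
  · rcases culture_lookup (PySem.Str.lower (PySem.Str.strip (category.getD ""))) with h | hN
    · exact absurd h hC0
    · rw [if_neg hC0]
      exact nonempty_case _ _ hN hnd _ rfl
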